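-- pv_equiv track=rewrite | github.com/abaire/nv2a-define-collator | src/nv2a_define_collator/generate_nv2a_constants.py | _map_children_to_parents
-- ===== SOURCE A (Python) =====
-- CHILD_ASSOCIATION_OVERRIDE: dict[str, str] = {
--     "NV062_SET_COLOR_FORMAT_LE_X8R8G8B8_Z8R8G8B8": "NV062_SET_COLOR_FORMAT",
--     "NV097_SET_CULL_FACE_ENABLE": "",
--     "NV097_SET_LOGIC_OP_ENABLE": "",
--     "NV097_SET_POINT_PARAMS_ENABLE": "",
--     "NV097_SET_STENCIL_FUNC_MASK": "",
--     "NV097_SET_STENCIL_FUNC_REF": "",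
--     "NV097_SET_TEXTURE_MATRIX_ENABLE": "",
--     "NV097_SET_TRANSFORM_CONSTANT_LOAD": "",
--     "NV097_SET_TRANSFORM_PROGRAM_CXT_WRITE_EN": "",
--     "NV097_SET_TRANSFORM_PROGRAM_LOAD": "",
--     "NV097_SET_TRANSFORM_PROGRAM_START": "",
-- }
--
-- def _map_children_to_parents(all_names: dict[str, list[str]]) -> dict[str, str]:
--     min_len = min(len(components) for components in all_names.values())
--
--     child_to_parent_map = {}
--     for name, components in all_names.items():
--         if len(components) <= min_len:
--             continue
--
--         parent_name = CHILD_ASSOCIATION_OVERRIDE.get(name)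
--         if parent_name:
--             child_to_parent_map[name] = parent_name
--             continue
--         if parent_name is not None:
--             continue
--
--         for i in range(len(components) - 1, min_len - 1, -1):
--             parent_name = "_".join(components[:i])
--             if parent_name in all_names:
--                 child_to_parent_map[name] = parent_name
--                 break
--
--     return child_to_parent_map
-- ===== SOURCE B (Python) =====
-- CHILD_ASSOCIATION_OVERRIDE: dict[str, str] = {
--     "NV062_SET_COLOR_FORMAT_LE_X8R8G8B8_Z8R8G8B8": "NV062_SET_COLOR_FORMAT",
--     "NV097_SET_CULL_FACE_ENABLE": "",
--     "NV097_SET_LOGIC_OP_ENABLE": "",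
--     "NV097_SET_POINT_PARAMS_ENABLE": "",
--     "NV097_SET_STENCIL_FUNC_MASK": "",
--     "NV097_SET_STENCIL_FUNC_REF": "",
--     "NV097_SET_TEXTURE_MATRIX_ENABLE": "",
--     "NV097_SET_TRANSFORM_CONSTANT_LOAD": "",
--     "NV097_SET_TRANSFORM_PROGRAM_CXT_WRITE_EN": "",
--     "NV097_SET_TRANSFORM_PROGRAM_LOAD": "",
--     "NV097_SET_TRANSFORM_PROGRAM_START": "",
-- }
--
--
-- def _map_children_to_parents(all_names: dict[str, list[str]]) -> dict[str, str]:
--     # Single forward pass per name: grow the prefix string incrementally and keep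
--     # the deepest prefix that is an existing key (instead of rebuilding each
--     # prefix with a slice+join while scanning backwards for the first hit).
--     min_len = min(len(components) for components in all_names.values())
--
--     child_to_parent_map = {}
--     for name, components in all_names.items():
--         n = len(components)
--         if n <= min_len:
--             continue
--
--         if name in CHILD_ASSOCIATION_OVERRIDE:
--             override = CHILD_ASSOCIATION_OVERRIDE[name]
--             if override:
--                 child_to_parent_map[name] = override
--             continue
--
--         prefix = "_".join(components[:min_len])
--         best = prefix if prefix in all_names else None
--         for i in range(min_len, n - 1):
--             prefix = components[i] if i == 0 else prefix + "_" + components[i]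
--             if prefix in all_names:
--                 best = prefix
--         if best is not None:
--             child_to_parent_map[name] = best
--
--     return child_to_parent_map
-- ===== Notes on version B (the rewrite author's own statement) =====
-- stated objective: alternative
-- what changed: A scans prefix depths backwards, rebuilding every candidate with slice+join and stopping at the first existing key; B makes one forward pass per name that grows the prefix string incrementally and keeps the deepest existing prefix (plus a membership test instead of .get's tri-state).
-- outside the precondition, e.g. on _map_children_to_parents({}): A raises ValueError, B raises ValueError
import Mathlib
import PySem

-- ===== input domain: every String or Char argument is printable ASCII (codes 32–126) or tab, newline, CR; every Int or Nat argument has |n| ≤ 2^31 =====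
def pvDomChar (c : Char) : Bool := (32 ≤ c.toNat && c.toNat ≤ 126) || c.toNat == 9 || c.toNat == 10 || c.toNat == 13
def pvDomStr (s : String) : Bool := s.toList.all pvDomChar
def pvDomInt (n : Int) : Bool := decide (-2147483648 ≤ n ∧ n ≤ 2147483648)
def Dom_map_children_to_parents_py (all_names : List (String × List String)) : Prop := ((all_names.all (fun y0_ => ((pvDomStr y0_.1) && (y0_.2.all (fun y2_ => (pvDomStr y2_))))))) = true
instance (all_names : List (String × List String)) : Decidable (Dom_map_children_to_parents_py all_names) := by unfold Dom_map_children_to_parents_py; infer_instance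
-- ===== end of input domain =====

-- B replaces A's backward first-match scan (rebuilding every candidate prefix with a
-- slice + join) by one forward pass per name that grows the prefix string incrementally
-- and keeps the deepest existing prefix; objective: alternative decomposition.


-- ===== PORT A =====

-- the module constant CHILD_ASSOCIATION_OVERRIDE
def pvOverride : PySem.Dict String String := PySem.Dict.ofList [
  ("NV062_SET_COLOR_FORMAT_LE_X8R8G8B8_Z8R8G8B8", "NV062_SET_COLOR_FORMAT"),
  ("NV097_SET_CULL_FACE_ENABLE", ""),
  ("NV097_SET_LOGIC_OP_ENABLE", ""),
  ("NV097_SET_POINT_PARAMS_ENABLE", ""),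
  ("NV097_SET_STENCIL_FUNC_MASK", ""),
  ("NV097_SET_STENCIL_FUNC_REF", ""),
  ("NV097_SET_TEXTURE_MATRIX_ENABLE", ""),
  ("NV097_SET_TRANSFORM_CONSTANT_LOAD", ""),
  ("NV097_SET_TRANSFORM_PROGRAM_CXT_WRITE_EN", ""),
  ("NV097_SET_TRANSFORM_PROGRAM_LOAD", ""),
  ("NV097_SET_TRANSFORM_PROGRAM_START", "")]

-- "_".join(components[:i])
def pvJoinPrefix (components : List String) (i : Int) : String :=
  PySem.Str.join "_" (PySem.List.slice components none (some i))

-- A's inner loop: first i (scanning the given index list) whose prefix join is a key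
def pvSearchA (keys : List String) (components : List String) : List Int → Option String
  | [] => none
  | i :: rest =>
      let parent_name := pvJoinPrefix components i
      if keys.contains parent_name then some parent_name
      else pvSearchA keys components rest

-- A's loop body over one (name, components) item
def pvStepA (min_len : Int) (keys : List String)
    (m : PySem.Dict String String) (kv : String × List String) : PySem.Dict String String :=
  if (kv.2.length : Int) ≤ min_len then m
  else
    match pvOverride.get? kv.1 with
    | some parent_name => if parent_name ≠ "" then m.insert kv.1 parent_name else m
    | none =>
        match pvSearchA keys kv.2
          (PySem.List.pyRange ((kv.2.length : Int) - 1) (min_len - 1) (-1)) with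
        | some parent_name => m.insert kv.1 parent_name
        | none => m

def map_children_to_parents_py (all_names : List (String × List String)) : List (String × String) :=
  -- min(...) raises ValueError on an empty dict: excluded by Pre_ (the .getD 0 is unreachable inside Pre_)
  let min_len : Int := (PySem.List.min? (all_names.map (fun kv => (kv.2.length : Int))) (fun x => x)).getD 0
  let keys := all_names.map Prod.fst
  (all_names.foldl (pvStepA min_len keys) PySem.Dict.empty).items

-- ===== PORT B =====

-- B's loop body: forward pass growing the prefix incrementally, keeping the last hit
def pvStepB (min_len : Int) (keys : List String)
    (m : PySem.Dict String String) (kv : String × List String) : PySem.Dict String String :=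
  let n : Int := kv.2.length
  if n ≤ min_len then m
  else if pvOverride.contains kv.1 then
    let override := pvOverride.getD kv.1 ""
    if override ≠ "" then m.insert kv.1 override else m
  else
    let prefix0 := pvJoinPrefix kv.2 min_len
    let best0 : Option String := if keys.contains prefix0 then some prefix0 else none
    let res := (PySem.List.pyRange min_len (n - 1) 1).foldl
      (fun (st : String × Option String) i =>
        -- index i is in range 0 ≤ i < n, so pyGetD's default is unreachable
        let pfx := if i = 0 then PySem.List.pyGetD kv.2 i ""
                   else st.1 ++ "_" ++ PySem.List.pyGetD kv.2 i ""
        if keys.contains pfx then (pfx, some pfx) else (pfx, st.2))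
      (prefix0, best0)
    match res.2 with
    | some best => m.insert kv.1 best
    | none => m

def map_children_to_parents_py_alt (all_names : List (String × List String)) : List (String × String) :=
  let min_len : Int := (PySem.List.min? (all_names.map (fun kv => (kv.2.length : Int))) (fun x => x)).getD 0
  let keys := all_names.map Prod.fst
  (all_names.foldl (pvStepB min_len keys) PySem.Dict.empty).items

-- ===== PRECONDITION & SPEC =====
-- Pre_ excludes the empty dict (Python's min() raises ValueError there) and association
-- lists with duplicate keys, which a Python dict argument cannot represent.
def Pre_map_children_to_parents_py (all_names : List (String × List String)) : Prop :=
  all_names ≠ [] ∧ (all_names.map Prod.fst).Nodup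
instance (all_names : List (String × List String)) : Decidable (Pre_map_children_to_parents_py all_names) := by unfold Pre_map_children_to_parents_py; infer_instance

def pvWitness_map_children_to_parents_py : (List (String × List String)) :=
  [("NV", ["NV"]), ("NV_SET", ["NV", "SET"]), ("NV_SET_A", ["NV", "SET", "A"])]

def Spec_map_children_to_parents_py (all_names : List (String × List String)) (out : List (String × String)) : Prop := out = map_children_to_parents_py_alt all_names
instance (all_names : List (String × List String)) (out : List (String × String)) : Decidable (Spec_map_children_to_parents_py all_names out) := by unfold Spec_map_children_to_parents_py; infer_instance

-- ===== CLAIM (what is proved, stated in full; the proofs are below) =====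
def Claim_equal_map_children_to_parents_py : Prop := ∀ (all_names : List (String × List String)), Dom_map_children_to_parents_py all_names → Pre_map_children_to_parents_py all_names → Spec_map_children_to_parents_py all_names (map_children_to_parents_py all_names)

-- ===== LEMMAS AND PROOFS =====

theorem pvJoinPrefix_natCast (c : List String) (k : Nat) :
    pvJoinPrefix c (k : Int) = PySem.Str.join "_" (c.take k) := by
  unfold pvJoinPrefix
  rw [PySem.List.slice_to_natCast]

theorem pvCharsJoin_snoc (sep : List Char) (xs : List (List Char)) (x : List Char) :
    PySem.Chars.join sep (xs ++ [x]) =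
      (if xs = [] then x else PySem.Chars.join sep xs ++ sep ++ x) := by
  induction xs with
  | nil => simp [PySem.Chars.join_singleton]
  | cons a t ih =>
      cases t with
      | nil => simp [PySem.Chars.join_cons_cons, PySem.Chars.join_singleton]
      | cons b t2 =>
          simp only [List.cons_append, PySem.Chars.join_cons_cons, ih] at *
          simp [List.append_assoc]

theorem pvJoin_snoc (xs : List String) (x : String) :
    PySem.Str.join "_" (xs ++ [x]) =
      (if xs = [] then x else PySem.Str.join "_" xs ++ "_" ++ x) := by
  by_cases h : xs = []
  · subst h
    apply String.toList_inj.mp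
    simp [PySem.Str.toList_join, PySem.Chars.join_singleton]
  · rw [if_neg h]
    apply String.toList_inj.mp
    simp only [PySem.Str.toList_join, String.toList_append, List.map_append, List.map]
    rw [pvCharsJoin_snoc, if_neg (by simp [h])]

theorem pvJoinPrefix_succ (c : List String) (k : Nat) (hk : k < c.length) :
    pvJoinPrefix c ((k : Int) + 1) =
      (if (k : Int) = 0 then PySem.List.pyGetD c (k : Int) ""
       else pvJoinPrefix c (k : Int) ++ "_" ++ PySem.List.pyGetD c (k : Int) "") := by
  have h1 : ((k : Int) + 1) = ((k + 1 : Nat) : Int) := by push_cast; ring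
  rw [h1, pvJoinPrefix_natCast, pvJoinPrefix_natCast, List.take_add_one,
    PySem.List.pyGetD_natCast, List.getElem?_eq_getElem hk]
  simp only [Option.toList_some]
  rw [pvJoin_snoc]
  have hiff : c.take k = [] ↔ (k : Int) = 0 := by
    rw [List.take_eq_nil_iff]
    constructor
    · rintro (h0 | h0)
      · exact_mod_cast congrArg (Nat.cast : Nat → Int) h0
      · subst h0; simp at hk
    · intro h0
      exact Or.inl (by exact_mod_cast h0)
  rcases em ((k : Int) = 0) with h0 | h0
  · rw [if_pos (hiff.mpr h0), if_pos h0]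
    simp [List.getD_eq_getElem?_getD, List.getElem?_eq_getElem hk]
  · rw [if_neg (fun hc => h0 (hiff.mp hc)), if_neg h0]
    simp [List.getD_eq_getElem?_getD, List.getElem?_eq_getElem hk]

theorem pvSearchA_eq_find (keys : List String) (c : List String) (l : List Int) :
    pvSearchA keys c l =
      (l.find? (fun i => keys.contains (pvJoinPrefix c i))).map (pvJoinPrefix c) := by
  induction l with
  | nil => rfl
  | cons i rest ih =>
      simp only [pvSearchA, List.find?_cons]
      by_cases h : pvJoinPrefix c i ∈ keys
      · simp [h]
      · simp [h, ih]

theorem pvFoldB (keys c : List String) :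
    ∀ (len : Nat) (a : Int) (best : Option String), 0 ≤ a → a + (len : Int) ≤ (c.length : Int) →
      ((PySem.List.pyRange a (a + (len : Int)) 1).foldl
        (fun (st : String × Option String) i =>
          let pfx := if i = 0 then PySem.List.pyGetD c i ""
                     else st.1 ++ "_" ++ PySem.List.pyGetD c i ""
          if keys.contains pfx then (pfx, some pfx) else (pfx, st.2))
        (pvJoinPrefix c a, best)) =
      (pvJoinPrefix c (a + (len : Int)),
        match (PySem.List.pyRange (a + 1) (a + (len : Int) + 1) 1).reverse.find?
            (fun i => keys.contains (pvJoinPrefix c i)) with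
        | some j => some (pvJoinPrefix c j)
        | none => best) := by
  intro len
  induction len with
  | zero =>
      intro a best ha hle
      rw [PySem.List.pyRange_one_eq_nil (by push_cast; omega),
        PySem.List.pyRange_one_eq_nil (by push_cast; omega)]
      simp
  | succ len ih =>
      intro a best ha hle
      have hlen : ((len + 1 : Nat) : Int) = (len : Int) + 1 := by push_cast; ring
      have hk : a.toNat < c.length := by omega
      have hcast : ((a.toNat : Int)) = a := Int.toNat_of_nonneg ha
      have hstep : (if a = 0 then PySem.List.pyGetD c a ""
            else pvJoinPrefix c a ++ "_" ++ PySem.List.pyGetD c a "") = pvJoinPrefix c (a + 1) := by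
        rw [← hcast, pvJoinPrefix_succ c a.toNat hk]
      rw [PySem.List.pyRange_one_cons (by omega : a < a + ((len + 1 : Nat) : Int))]
      simp only [List.foldl_cons]
      rw [hstep]
      have harg : a + ((len + 1 : Nat) : Int) = (a + 1) + ((len : Nat) : Int) := by omega
      have hres := ih (a + 1)
        (if (pvJoinPrefix c (a + 1)) ∈ keys then some (pvJoinPrefix c (a + 1)) else best)
        (by omega) (by omega)
      rw [harg]
      by_cases hP : (pvJoinPrefix c (a + 1)) ∈ keys
      · simp only [List.contains_eq_mem, hP, decide_true, if_true] at hres ⊢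
        rw [hres]
        congr 1
        rw [show (a + 1) + ((len : Nat) : Int) + 1 = (a + 1 + 1) + ((len : Nat) : Int) by omega] at *
        rw [show a + 1 + 1 = a + 2 by omega] at *
        rw [PySem.List.pyRange_one_append (a + 1) (a + 2) (a + 2 + (len : Nat))
          (by omega) (by omega), List.reverse_append, List.find?_append]
        rw [show PySem.List.pyRange (a+1) (a+2) 1 = [a+1] from by
          rw [show (a:Int)+2 = (a+1)+1 by omega]; exact PySem.List.pyRange_one_singleton (a+1)]
        cases hf : List.find? (fun i => decide (pvJoinPrefix c i ∈ keys))
            ((PySem.List.pyRange (a + 2) (a + 2 + (len : Nat)) 1).reverse) with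
        | some j => simp
        | none => simp [hP]
      · simp only [List.contains_eq_mem, hP, decide_false, Bool.false_eq_true, if_false] at hres ⊢
        rw [hres]
        congr 1
        rw [show (a + 1) + ((len : Nat) : Int) + 1 = (a + 1 + 1) + ((len : Nat) : Int) by omega] at *
        rw [show a + 1 + 1 = a + 2 by omega] at *
        rw [PySem.List.pyRange_one_append (a + 1) (a + 2) (a + 2 + (len : Nat))
          (by omega) (by omega), List.reverse_append, List.find?_append]
        rw [show PySem.List.pyRange (a+1) (a+2) 1 = [a+1] from by
          rw [show (a:Int)+2 = (a+1)+1 by omega]; exact PySem.List.pyRange_one_singleton (a+1)]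
        cases hf : List.find? (fun i => decide (pvJoinPrefix c i ∈ keys))
            ((PySem.List.pyRange (a + 2) (a + 2 + (len : Nat)) 1).reverse) with
        | some j => simp
        | none => simp [hP]

theorem pvStep_eq (min_len : Int) (keys : List String) (hmin : 0 ≤ min_len) :
    pvStepA min_len keys = pvStepB min_len keys := by
  funext m kv
  unfold pvStepA pvStepB
  by_cases hlen : (kv.2.length : Int) ≤ min_len
  · simp [hlen]
  · rw [if_neg hlen, if_neg hlen]
    rw [PySem.Dict.contains_eq_isSome_get?]
    cases hov : pvOverride.get? kv.1 with
    | some p =>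
        simp only [hov, Option.isSome_some, if_true,
          PySem.Dict.getD_eq_get?_getD, Option.getD_some]
    | none =>
        simp only [Option.isSome_none, Bool.false_eq_true, if_false]
        -- the searches agree
        have hsearch : pvSearchA keys kv.2
            (PySem.List.pyRange ((kv.2.length : Int) - 1) (min_len - 1) (-1)) =
            ((PySem.List.pyRange min_len ((kv.2.length : Int) - 1) 1).foldl
              (fun (st : String × Option String) i =>
                let pfx := if i = 0 then PySem.List.pyGetD kv.2 i ""
                           else st.1 ++ "_" ++ PySem.List.pyGetD kv.2 i ""
                if keys.contains pfx then (pfx, some pfx) else (pfx, st.2))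
              (pvJoinPrefix kv.2 min_len,
                if keys.contains (pvJoinPrefix kv.2 min_len)
                then some (pvJoinPrefix kv.2 min_len) else none)).2 := by
          rw [pvSearchA_eq_find, PySem.List.pyRange_neg_one_eq_reverse,
            show min_len - 1 + 1 = min_len by ring,
            show (kv.2.length : Int) - 1 + 1 = (kv.2.length : Int) by ring]
          have hfold := pvFoldB keys kv.2 (((kv.2.length : Int) - 1) - min_len).toNat min_len
            (if keys.contains (pvJoinPrefix kv.2 min_len)
             then some (pvJoinPrefix kv.2 min_len) else none)
            hmin (by omega)
          rw [show min_len + ((((kv.2.length : Int) - 1) - min_len).toNat : Int)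
              = (kv.2.length : Int) - 1 by omega] at hfold
          rw [show (kv.2.length : Int) - 1 + 1 = (kv.2.length : Int) by ring] at hfold
          rw [hfold]
          rw [PySem.List.pyRange_one_append min_len (min_len + 1) (kv.2.length : Int)
            (by omega) (by omega), List.reverse_append, List.find?_append,
            PySem.List.pyRange_one_singleton]
          cases hf : List.find? (fun i => decide (pvJoinPrefix kv.2 i ∈ keys))
              ((PySem.List.pyRange (min_len + 1) (kv.2.length : Int) 1).reverse) with
          | some j => simp [hf]
          | none =>
              by_cases hP : pvJoinPrefix kv.2 min_len ∈ keys
              · simp [hf, hP]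
              · simp [hf, hP]
        rw [hsearch]


theorem pvMin_nonneg (all_names : List (String × List String)) :
    0 ≤ (PySem.List.min? (all_names.map (fun kv => (kv.2.length : Int))) (fun x => x)).getD 0 := by
  cases h : PySem.List.min? (all_names.map (fun kv => (kv.2.length : Int))) (fun x => x) with
  | none => simp
  | some v =>
      have hv := PySem.List.min?_mem h
      simp only [List.mem_map] at hv
      obtain ⟨kv, _, hkv⟩ := hv
      simp [← hkv]

-- ===== VERDICT (by name: the statement is the Claim_ definition above) =====
theorem map_children_to_parents_py_spec : Claim_equal_map_children_to_parents_py := by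
  intro all_names _ _
  unfold Spec_map_children_to_parents_py map_children_to_parents_py map_children_to_parents_py_alt
  simp only [pvStep_eq _ _ (pvMin_nonneg all_names)]
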